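-- pv_equiv track=rewrite | github.com/linkaform/modules | tests/reporte_stock.py | format_catalog_wharehouse
-- ===== SOURCE A (Python) =====
-- def format_catalog_wharehouse(data_query):
--     list_response = []
--     for item in data_query:
--         wharehouse = item.get('6442e4831198daf81456f274','')
--         if wharehouse not in list_response and wharehouse !='':
--             list_response.append(wharehouse)
--
--     list_response.sort()
--     return list_response
-- ===== SOURCE B (Python) =====
-- def format_catalog_wharehouse(data_query):
--     # collect all non-empty values (duplicates kept), sort, then drop adjacent duplicates
--     vals = []
--     for item in data_query:
--         w = item.get('6442e4831198daf81456f274', '')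
--         if w != '':
--             vals.append(w)
--     vals.sort()
--     out = []
--     for w in vals:
--         if not out or out[-1] != w:
--             out.append(w)
--     return out
-- ===== Notes on version B (the rewrite author's own statement) =====
-- stated objective: alternative
-- what changed: A dedups with an O(n) membership scan into the growing result while collecting, then sorts; B collects all non-empty values with no membership test, sorts the multiset, and removes adjacent duplicates in one linear scan over the sorted list.
import Mathlib
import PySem

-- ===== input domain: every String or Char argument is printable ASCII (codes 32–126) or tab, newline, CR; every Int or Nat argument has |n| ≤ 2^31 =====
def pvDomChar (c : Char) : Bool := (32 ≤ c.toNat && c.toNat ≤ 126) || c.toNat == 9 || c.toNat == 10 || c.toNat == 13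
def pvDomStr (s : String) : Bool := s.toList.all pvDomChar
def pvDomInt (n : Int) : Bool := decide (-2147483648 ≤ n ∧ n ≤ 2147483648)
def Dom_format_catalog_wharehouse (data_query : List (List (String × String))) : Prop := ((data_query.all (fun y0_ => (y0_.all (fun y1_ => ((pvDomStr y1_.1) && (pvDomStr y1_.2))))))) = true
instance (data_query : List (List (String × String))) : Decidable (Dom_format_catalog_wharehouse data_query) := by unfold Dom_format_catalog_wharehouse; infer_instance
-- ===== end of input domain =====

-- B collects non-empty warehouse values without membership tests, sorts, then drops adjacent
-- duplicates in one linear scan (alternative decomposition of A's dedup-while-collecting + sort).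


-- item.get('6442e4831198daf81456f274', '')
def fcwVal (item : List (String × String)) : String :=
  (PySem.Dict.mk item).getD "6442e4831198daf81456f274" ""

-- ===== PORT A =====
def format_catalog_wharehouse (data_query : List (List (String × String))) : List String :=
  let list_response :=
    data_query.foldl
      (fun list_response item =>
        let wharehouse := fcwVal item
        if wharehouse ∉ list_response ∧ wharehouse ≠ "" then list_response ++ [wharehouse]
        else list_response)
      []
  PySem.List.sorted list_response (fun x => x)

-- ===== PORT B =====
def format_catalog_wharehouse_alt (data_query : List (List (String × String))) : List String :=
  let vals :=
    data_query.foldl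
      (fun vals item =>
        let w := fcwVal item
        if w ≠ "" then vals ++ [w] else vals)
      []
  (PySem.List.sorted vals (fun x => x)).foldl
    (fun out w => if out = [] ∨ out.getLast? ≠ some w then out ++ [w] else out)
    []

-- ===== PRECONDITION & SPEC =====
def Spec_format_catalog_wharehouse (data_query : List (List (String × String))) (out : List String) : Prop := out = format_catalog_wharehouse_alt data_query
instance (data_query : List (List (String × String))) (out : List String) : Decidable (Spec_format_catalog_wharehouse data_query out) := by unfold Spec_format_catalog_wharehouse; infer_instance

-- ===== CLAIM (what is proved, stated in full; the proofs are below) =====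
def Claim_equal_format_catalog_wharehouse : Prop := ∀ (data_query : List (List (String × String))), Dom_format_catalog_wharehouse data_query → Spec_format_catalog_wharehouse data_query (format_catalog_wharehouse data_query)

-- ===== LEMMAS AND PROOFS =====

-- A's accumulator after the collecting loop: Nodup, and membership = "some item yields it, non-empty".
theorem fcw_foldA_spec (dq : List (List (String × String))) :
    ∀ (acc : List String), acc.Nodup →
      (dq.foldl
        (fun a item =>
          let w := fcwVal item
          if w ∉ a ∧ w ≠ "" then a ++ [w] else a) acc).Nodup ∧
      (∀ x, x ∈ dq.foldl
        (fun a item =>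
          let w := fcwVal item
          if w ∉ a ∧ w ≠ "" then a ++ [w] else a) acc ↔
        x ∈ acc ∨ ∃ item ∈ dq, fcwVal item = x ∧ x ≠ "") := by
  induction dq with
  | nil => intro acc hnd; simpa using hnd
  | cons it t ih =>
    intro acc hnd
    simp only [List.foldl_cons]
    by_cases hc : fcwVal it ∉ acc ∧ fcwVal it ≠ ""
    · have hnd' : (acc ++ [fcwVal it]).Nodup := by
        simp [List.nodup_append, hnd]
        exact fun a ha h => hc.1 (h ▸ ha)
      obtain ⟨h1, h2⟩ := ih (acc ++ [fcwVal it]) hnd'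
      refine ⟨by simpa [hc] using h1, ?_⟩
      intro x
      rw [if_pos hc] at *
      rw [h2 x]
      constructor
      · rintro (hx | hx)
        · rcases List.mem_append.mp hx with hx | hx
          · exact Or.inl hx
          · simp only [List.mem_singleton] at hx
            exact Or.inr ⟨it, by simp, hx.symm, by simpa [hx] using hc.2⟩
        · obtain ⟨i, hi, hv⟩ := hx
          exact Or.inr ⟨i, by simp [hi], hv⟩
      · rintro (hx | ⟨i, hi, hv, hne⟩)
        · exact Or.inl (List.mem_append.mpr (Or.inl hx))
        · rcases List.mem_cons.mp hi with rfl | hi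
          · exact Or.inl (List.mem_append.mpr (Or.inr (by simp [hv])))
          · exact Or.inr ⟨i, hi, hv, hne⟩
    · obtain ⟨h1, h2⟩ := ih acc hnd
      refine ⟨by simpa [hc] using h1, ?_⟩
      intro x
      rw [if_neg hc, h2 x]
      constructor
      · rintro (hx | ⟨i, hi, hv⟩)
        · exact Or.inl hx
        · exact Or.inr ⟨i, by simp [hi], hv⟩
      · rintro (hx | ⟨i, hi, hv, hne⟩)
        · exact Or.inl hx
        · rcases List.mem_cons.mp hi with rfl | hi
          · push Not at hc
            rcases Classical.em (fcwVal i ∈ acc) with h | h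
            · exact Or.inl (hv ▸ h)
            · exact absurd (hv ▸ hne) (by simpa using hc h)
          · exact Or.inr ⟨i, hi, hv, hne⟩

-- B's collecting loop: membership = "some item yields it, non-empty".
theorem fcw_foldB_mem (dq : List (List (String × String))) :
    ∀ (acc : List String) (x : String),
      (x ∈ dq.foldl
        (fun a item =>
          let w := fcwVal item
          if w ≠ "" then a ++ [w] else a) acc ↔
        x ∈ acc ∨ ∃ item ∈ dq, fcwVal item = x ∧ x ≠ "") := by
  induction dq with
  | nil => intro acc x; simp
  | cons it t ih =>
    intro acc x
    simp only [List.foldl_cons]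
    by_cases hc : fcwVal it ≠ ""
    · rw [if_pos hc, ih]
      constructor
      · rintro (hx | ⟨i, hi, hv⟩)
        · rcases List.mem_append.mp hx with hx | hx
          · exact Or.inl hx
          · simp only [List.mem_singleton] at hx
            exact Or.inr ⟨it, by simp, hx.symm, by simpa [hx] using hc⟩
        · exact Or.inr ⟨i, by simp [hi], hv⟩
      · rintro (hx | ⟨i, hi, hv, hne⟩)
        · exact Or.inl (List.mem_append.mpr (Or.inl hx))
        · rcases List.mem_cons.mp hi with rfl | hi
          · exact Or.inl (List.mem_append.mpr (Or.inr (by simp [hv])))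
          · exact Or.inr ⟨i, hi, hv, hne⟩
    · rw [if_neg hc, ih]
      push Not at hc
      constructor
      · rintro (hx | ⟨i, hi, hv⟩)
        · exact Or.inl hx
        · exact Or.inr ⟨i, by simp [hi], hv⟩
      · rintro (hx | ⟨i, hi, hv, hne⟩)
        · exact Or.inl hx
        · rcases List.mem_cons.mp hi with rfl | hi
          · exact absurd (hv.symm.trans hc) hne
          · exact Or.inr ⟨i, hi, hv, hne⟩

-- In a strictly increasing list every element is ≤ the last one.
theorem fcw_le_getLast : ∀ {l : List String}, l.Pairwise (· < ·) →
    ∀ {a m : String}, a ∈ l → l.getLast? = some m → a ≤ m := by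
  intro l
  induction l with
  | nil => intro _ a m ha _; cases ha
  | cons y t ih =>
    intro hp a m ha hm
    cases t with
    | nil =>
      simp only [List.getLast?_singleton, Option.some.injEq] at hm
      simp only [List.mem_singleton] at ha
      exact le_of_eq (ha.trans hm)
    | cons z t' =>
      rw [List.getLast?_cons_cons] at hm
      rcases List.mem_cons.mp ha with rfl | ha
      · have hzm : z ≤ m := ih hp.of_cons (by simp) hm
        exact le_of_lt (lt_of_lt_of_le (List.rel_of_pairwise_cons hp (by simp)) hzm)
      · exact ih hp.of_cons ha hm

-- The adjacent-dedup fold: output is strictly increasing with the same members.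
theorem fcw_dedupAdj_spec (l : List String) :
    ∀ (out : List String), l.Pairwise (· ≤ ·) → out.Pairwise (· < ·) →
      (∀ x ∈ out, ∀ y ∈ l, x ≤ y) →
      (l.foldl (fun out w => if out = [] ∨ out.getLast? ≠ some w then out ++ [w] else out) out).Pairwise (· < ·) ∧
      (∀ x, x ∈ l.foldl (fun out w => if out = [] ∨ out.getLast? ≠ some w then out ++ [w] else out) out ↔
        x ∈ out ∨ x ∈ l) := by
  induction l with
  | nil => intro out _ hout _; exact ⟨hout, by simp⟩
  | cons y t ih =>
    intro out hl hout hle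
    simp only [List.foldl_cons]
    have hlt : t.Pairwise (· ≤ ·) := hl.of_cons
    by_cases hc : out = [] ∨ out.getLast? ≠ some y
    · rw [if_pos hc]
      have hally : ∀ x ∈ out, x < y := by
        intro x hx
        rcases hc with hc | hc
        · subst hc; cases hx
        · obtain ⟨m, hm⟩ : ∃ m, out.getLast? = some m := by
            rcases hq : out.getLast? with _ | m
            · exact absurd (List.getLast?_eq_none_iff.mp hq) (by rintro rfl; cases hx)
            · exact ⟨m, rfl⟩
          have hmy : m ≤ y := hle m (List.mem_of_getLast? hm) y (by simp)
          have hmne : m ≠ y := by rintro rfl; exact hc hm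
          exact lt_of_le_of_lt (fcw_le_getLast hout hx hm) (lt_of_le_of_ne hmy hmne)
      have hout' : (out ++ [y]).Pairwise (· < ·) := by
        rw [List.pairwise_append]
        exact ⟨hout, by simp, by simpa using hally⟩
      have hle' : ∀ x ∈ out ++ [y], ∀ z ∈ t, x ≤ z := by
        intro x hx z hz
        rcases List.mem_append.mp hx with hx | hx
        · exact hle x hx z (by simp [hz])
        · simp only [List.mem_singleton] at hx
          exact hx ▸ List.rel_of_pairwise_cons hl hz
      obtain ⟨h1, h2⟩ := ih (out ++ [y]) hlt hout' hle'
      refine ⟨h1, fun x => ?_⟩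
      rw [h2 x]
      simp [or_assoc]
    · rw [if_neg hc]
      push Not at hc
      have hy : y ∈ out := List.mem_of_getLast? hc.2
      have hle' : ∀ x ∈ out, ∀ z ∈ t, x ≤ z := fun x hx z hz => hle x hx z (by simp [hz])
      obtain ⟨h1, h2⟩ := ih out hlt hout hle'
      refine ⟨h1, fun x => ?_⟩
      rw [h2 x]
      constructor
      · rintro (hx | hx)
        · exact Or.inl hx
        · exact Or.inr (by simp [hx])
      · rintro (hx | hx)
        · exact Or.inl hx
        · rcases List.mem_cons.mp hx with rfl | hx
          · exact Or.inl hy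
          · exact Or.inr hx

-- ===== VERDICT (by name: the statement is the Claim_ definition above) =====
theorem format_catalog_wharehouse_spec : Claim_equal_format_catalog_wharehouse := by
  intro dq _
  unfold Spec_format_catalog_wharehouse format_catalog_wharehouse format_catalog_wharehouse_alt
  simp only []
  set step := fun (a : List String) (item : List (String × String)) =>
    let w := fcwVal item
    if w ∉ a ∧ w ≠ "" then a ++ [w] else a with hstep
  obtain ⟨hndA, hmemA⟩ := fcw_foldA_spec dq [] (by simp)
  set LA := dq.foldl step [] with hLA
  set V := dq.foldl (fun (a : List String) item =>
    let w := fcwVal item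
    if w ≠ "" then a ++ [w] else a) [] with hV
  have hSle : (PySem.List.sorted V (fun x => x)).Pairwise (· ≤ ·) := by
    simpa using PySem.List.sorted_pairwise V (fun x => x)
  obtain ⟨hRlt, hRmem⟩ := fcw_dedupAdj_spec (PySem.List.sorted V (fun x => x)) []
    hSle (by simp) (by simp)
  set R := (PySem.List.sorted V (fun x => x)).foldl
    (fun out w => if out = [] ∨ out.getLast? ≠ some w then out ++ [w] else out) [] with hR
  have hRnd : R.Nodup := hRlt.imp (fun h => ne_of_lt h)
  have hmemEq : ∀ x, x ∈ R ↔ x ∈ LA := by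
    intro x
    rw [hRmem x, hmemA x]
    simp only [List.not_mem_nil, false_or]
    rw [PySem.List.mem_sorted, fcw_foldB_mem dq [] x]
    simp
  have hperm : R.Perm LA := (List.perm_ext_iff_of_nodup hRnd hndA).mpr hmemEq
  exact PySem.List.sorted_eq_of_perm_of_pairwise_lt LA R (fun x => x) hperm
    (by simpa using hRlt)
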